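-- pv_equiv track=rewrite | github.com/pypi-data/pypi-mirror-299 | packages/pytorch-visualizer/pytorch_visualizer-0.1.2.tar.gz/pytorch_visualizer-0.1.2/pytorch_visualizer/generators_and_utility_functions.py | layer_nodes_generator
-- ===== SOURCE A (Python) =====
-- def generate_node_idx_for_nn(nn_structure:list|None=None, main_nn_structure=None, from_layer=1, to_layer=None)->list[list[str]]:
--     """
--     Returns a list of lists, where each inner list contains the indices of nodes for a specific layer.
--
--     Each inner list corresponds to a layer in a neural network, with the first layer's nodes at index 0,
--     the second layer's nodes at index 1, and so on. The index in the outer list is equal to the layer number minus one.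
--     """
--     start_layer_idx = from_layer - 1
--     if nn_structure is None:
--         nn_structure = main_nn_structure[start_layer_idx:to_layer]
--
--     node_idx_all_layers = [[f'node{node_idx+1}{layer_idx+1}' for node_idx in range(num_nodes)]
--                             for layer_idx, num_nodes in enumerate(nn_structure, start=start_layer_idx)]
--
--
--     return node_idx_all_layers
--
-- def layer_nodes_generator(nn_structure=None, generate_from_layer=1, main_nn_structure=None, from_layer=1, to_layer=None, backward=False):
--     """
--     Generates layer nodes indices per iteration, therefore the output is a list
--     nn_struture is always used unless nn_structure is not stated then main_nn_structure is used
--     generate_from_layer: it starts generating the output from the specified layer in the nn_structure not from the first layer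
--
--     from_layer: it starts generating the indices from the first layer in the nn_structure but making the index starts from tha stated layer
--     """
--
--     if nn_structure is None:
--         nn_structure = main_nn_structure
--
--     all_idxs = generate_node_idx_for_nn(nn_structure=nn_structure,
--                                         main_nn_structure=main_nn_structure,
--                                         from_layer=from_layer,
--                                         to_layer=to_layer)
--
--     if backward:
--         all_idxs.reverse()
--
--     index_start_layer = generate_from_layer - 1
--
--
--     for idxs in all_idxs[index_start_layer:]:
--         yield idxs
-- ===== SOURCE B (Python) =====
-- def layer_nodes_generator(nn_structure=None, generate_from_layer=1, main_nn_structure=None, from_layer=1, to_layer=None, backward=False):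
--     struct = main_nn_structure if nn_structure is None else nn_structure
--     n = len(struct)  # TypeError when both structures are None, as in A
--     start = generate_from_layer - 1
--     # normalize the Python slice start arithmetically instead of slicing a list
--     lo = max(n + start, 0) if start < 0 else min(start, n)
--     for i in range(lo, n):
--         orig = n - 1 - i if backward else i
--         layer_no = orig + from_layer
--         yield [f'node{j + 1}{layer_no}' for j in range(struct[orig])]
-- ===== Notes on version B (the rewrite author's own statement) =====
-- stated objective: faster
-- what changed: A materializes every per-layer label list via an enumerate helper, then reverses and slices that list of lists; B never builds any intermediate list: it normalizes the slice start arithmetically and iterates output positions over a single index range, mapping each position to its original layer by index arithmetic (n-1-i when backward) and building labels only for the layers actually yielded.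
import Mathlib
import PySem

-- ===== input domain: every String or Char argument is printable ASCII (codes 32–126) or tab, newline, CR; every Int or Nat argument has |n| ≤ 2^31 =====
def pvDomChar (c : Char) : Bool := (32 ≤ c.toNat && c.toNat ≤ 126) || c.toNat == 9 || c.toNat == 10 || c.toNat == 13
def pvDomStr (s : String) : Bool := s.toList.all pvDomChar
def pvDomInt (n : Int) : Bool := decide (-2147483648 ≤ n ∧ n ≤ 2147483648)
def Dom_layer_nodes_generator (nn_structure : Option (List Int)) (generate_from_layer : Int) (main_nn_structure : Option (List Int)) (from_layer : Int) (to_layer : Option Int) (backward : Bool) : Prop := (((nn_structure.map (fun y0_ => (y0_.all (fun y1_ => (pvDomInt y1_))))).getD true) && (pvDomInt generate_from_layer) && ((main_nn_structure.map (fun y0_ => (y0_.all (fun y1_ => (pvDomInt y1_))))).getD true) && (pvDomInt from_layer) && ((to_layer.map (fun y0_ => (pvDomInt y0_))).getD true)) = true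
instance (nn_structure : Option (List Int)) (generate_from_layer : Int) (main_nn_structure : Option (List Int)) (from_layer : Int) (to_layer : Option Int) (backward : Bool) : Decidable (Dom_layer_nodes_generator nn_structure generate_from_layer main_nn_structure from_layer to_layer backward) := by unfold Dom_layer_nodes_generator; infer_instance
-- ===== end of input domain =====

-- B replaces A's build-all/reverse/slice of a list of lists by pure index arithmetic over a
-- single output range, building only the emitted layers (objective: alternative decomposition).
-- Both Pythons are generators; the equivalence is about the list of yielded values.

-- ===== PORT A =====
def generate_node_idx_for_nn (nn_structure : Option (List Int)) (main_nn_structure : Option (List Int)) (from_layer : Int) (to_layer : Option Int) : Option (List (List String)) :=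
  let start_layer_idx := from_layer - 1
  -- if nn_structure is None: nn_structure = main_nn_structure[start_layer_idx:to_layer]
  -- (none result = TypeError when main_nn_structure is also None)
  let nn? : Option (List Int) :=
    match nn_structure with
    | none => main_nn_structure.map (fun m => PySem.List.slice m (some start_layer_idx) to_layer)
    | some s => some s
  nn?.map (fun s =>
    (PySem.List.enumerate s start_layer_idx).map (fun p =>
      (PySem.List.pyRange 0 p.2 1).map (fun node_idx =>
        "node" ++ PySem.Int.toStr (node_idx + 1) ++ PySem.Int.toStr (p.1 + 1))))

def layer_nodes_generator (nn_structure : Option (List Int)) (generate_from_layer : Int) (main_nn_structure : Option (List Int)) (from_layer : Int) (to_layer : Option Int) (backward : Bool) : List (List String) :=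
  let nn := match nn_structure with | none => main_nn_structure | some s => some s
  match generate_node_idx_for_nn nn main_nn_structure from_layer to_layer with
  | none => []  -- TypeError in Python: excluded by Pre_
  | some all_idxs =>
    let all_idxs := if backward then all_idxs.reverse else all_idxs
    let index_start_layer := generate_from_layer - 1
    PySem.List.slice all_idxs (some index_start_layer) none

-- ===== PORT B =====
def layer_nodes_generator_alt (nn_structure : Option (List Int)) (generate_from_layer : Int) (main_nn_structure : Option (List Int)) (from_layer : Int) (to_layer : Option Int) (backward : Bool) : List (List String) :=
  match (match nn_structure with | none => main_nn_structure | some s => some s) with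
  | none => []  -- TypeError in Python: excluded by Pre_
  | some struct =>
    let n : Int := struct.length
    let start := generate_from_layer - 1
    let lo := if start < 0 then max (n + start) 0 else min start n
    (PySem.List.pyRange lo n 1).map (fun i =>
      let orig := if backward then n - 1 - i else i
      let layer_no := orig + from_layer
      (PySem.List.pyRange 0 (PySem.List.pyGetD struct orig 0) 1).map (fun j =>
        "node" ++ PySem.Int.toStr (j + 1) ++ PySem.Int.toStr layer_no))

-- ===== PRECONDITION & SPEC =====
-- Pre_ excludes only the inputs where both structures are None: there Python A (and B) raise TypeError.
def Pre_layer_nodes_generator (nn_structure : Option (List Int)) (generate_from_layer : Int) (main_nn_structure : Option (List Int)) (from_layer : Int) (to_layer : Option Int) (backward : Bool) : Prop := nn_structure ≠ none ∨ main_nn_structure ≠ none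
instance (nn_structure : Option (List Int)) (generate_from_layer : Int) (main_nn_structure : Option (List Int)) (from_layer : Int) (to_layer : Option Int) (backward : Bool) : Decidable (Pre_layer_nodes_generator nn_structure generate_from_layer main_nn_structure from_layer to_layer backward) := by unfold Pre_layer_nodes_generator; infer_instance
def pvWitness_layer_nodes_generator : Option (List Int) × Int × Option (List Int) × Int × Option Int × Bool := (some [2, 3], 1, none, 1, none, false)

def Spec_layer_nodes_generator (nn_structure : Option (List Int)) (generate_from_layer : Int) (main_nn_structure : Option (List Int)) (from_layer : Int) (to_layer : Option Int) (backward : Bool) (out : List (List String)) : Prop := out = layer_nodes_generator_alt nn_structure generate_from_layer main_nn_structure from_layer to_layer backward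
instance (nn_structure : Option (List Int)) (generate_from_layer : Int) (main_nn_structure : Option (List Int)) (from_layer : Int) (to_layer : Option Int) (backward : Bool) (out : List (List String)) : Decidable (Spec_layer_nodes_generator nn_structure generate_from_layer main_nn_structure from_layer to_layer backward out) := by unfold Spec_layer_nodes_generator; infer_instance

-- ===== CLAIM =====
def Claim_equal_layer_nodes_generator : Prop := ∀ (nn_structure : Option (List Int)) (generate_from_layer : Int) (main_nn_structure : Option (List Int)) (from_layer : Int) (to_layer : Option Int) (backward : Bool), Dom_layer_nodes_generator nn_structure generate_from_layer main_nn_structure from_layer to_layer backward → Pre_layer_nodes_generator nn_structure generate_from_layer main_nn_structure from_layer to_layer backward → Spec_layer_nodes_generator nn_structure generate_from_layer main_nn_structure from_layer to_layer backward (layer_nodes_generator nn_structure generate_from_layer main_nn_structure from_layer to_layer backward)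

-- ===== LEMMAS AND PROOFS =====

-- proof-only abbreviations for the two shapes
def pvLabA (fl : Int) (s : List Int) : List (List String) :=
  (PySem.List.enumerate s (fl - 1)).map (fun p =>
    (PySem.List.pyRange 0 p.2 1).map (fun node_idx =>
      "node" ++ PySem.Int.toStr (node_idx + 1) ++ PySem.Int.toStr (p.1 + 1)))

def pvB (s : List Int) (gfl fl : Int) (bw : Bool) : List (List String) :=
  (PySem.List.pyRange (if gfl - 1 < 0 then max ((s.length : Int) + (gfl - 1)) 0 else min (gfl - 1) (s.length : Int)) (s.length : Int) 1).map (fun i =>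
    (PySem.List.pyRange 0 (PySem.List.pyGetD s (if bw then (s.length : Int) - 1 - i else i) 0) 1).map (fun j =>
      "node" ++ PySem.Int.toStr (j + 1) ++ PySem.Int.toStr ((if bw then (s.length : Int) - 1 - i else i) + fl)))

theorem getElem_pvLabA (fl : Int) (s : List Int) (j : Nat) (h : j < s.length) :
    (pvLabA fl s)[j]'(by simp [pvLabA]; exact h) =
      (PySem.List.pyRange 0 s[j] 1).map (fun node_idx =>
        "node" ++ PySem.Int.toStr (node_idx + 1) ++ PySem.Int.toStr ((fl - 1 + j) + 1)) := by
  simp [pvLabA, PySem.List.getElem_enumerate]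

theorem core_lemma (s : List Int) (gfl fl : Int) (bw : Bool) :
    PySem.List.slice (if bw then (pvLabA fl s).reverse else pvLabA fl s) (some (gfl - 1)) none
      = pvB s gfl fl bw := by
  rw [PySem.List.slice_some_none]
  set n : Int := (s.length : Int) with hn
  set a := gfl - 1 with ha
  set lo := if a < 0 then max (n + a) 0 else min a n with hlo
  have hlo0 : 0 ≤ lo := by rw [hlo]; split_ifs <;> simp [hn] <;> omega
  have hlon : lo ≤ n := by rw [hlo]; split_ifs <;> [skip; exact min_le_right _ _] <;> simp [hn] <;> omega
  have hlenL : (if bw then (pvLabA fl s).reverse else pvLabA fl s).length = s.length := by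
    cases bw <;> simp [pvLabA]
  have hclamp : PySem.List.clampIdx (if bw then (pvLabA fl s).reverse else pvLabA fl s).length a = lo.toNat := by
    rw [hlenL]; unfold PySem.List.clampIdx; rw [hlo]; split_ifs <;> omega
  rw [hclamp]
  unfold pvB
  rw [← ha, ← hn, ← hlo]
  apply List.ext_getElem
  · simp [hlenL, PySem.List.length_pyRange_one]; omega
  · intro i h1 h2
    simp only [List.getElem_map, PySem.List.getElem_pyRange_one]
    rw [List.getElem_drop]
    have hi : lo.toNat + i < s.length := by
      simp [hlenL] at h1; omega
    cases bw with
    | false =>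
        simp only [Bool.false_eq_true, if_false]
        rw [getElem_pvLabA fl s (lo.toNat + i) hi]
        have hcast : (lo + (i : Int)).toNat = lo.toNat + i := by omega
        have hgd : PySem.List.pyGetD s (lo + (i : Int)) 0 = s[lo.toNat + i]'hi := by
          rw [PySem.List.pyGetD_eq_getElem s 0 (by omega) (by omega)]
          simp only [hcast]
        rw [hgd]
        congr 1
        funext node_idx
        congr 2
        omega
    | true =>
        simp only [if_true]
        rw [List.getElem_reverse]
        have hrl : (pvLabA fl s).length = s.length := by simp [pvLabA]
        have hj : (pvLabA fl s).length - 1 - (lo.toNat + i) < s.length := by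
          rw [hrl]; omega
        rw [getElem_pvLabA fl s _ hj]
        have horig : (n - 1 - (lo + (i:Int))).toNat = (pvLabA fl s).length - 1 - (lo.toNat + i) := by
          rw [hrl]; omega
        have hgd : PySem.List.pyGetD s (n - 1 - (lo + (i:Int))) 0 = s[(pvLabA fl s).length - 1 - (lo.toNat + i)]'hj := by
          rw [PySem.List.pyGetD_eq_getElem s 0 (by simp [hlenL] at h1; omega) (by simp [hlenL] at h1; omega)]
          simp only [horig]
        rw [hgd]
        congr 1
        funext node_idx
        congr 2
        rw [hrl]
        simp [hlenL] at h1
        omega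

-- ===== VERDICT =====
theorem layer_nodes_generator_spec : Claim_equal_layer_nodes_generator := by
  intro ns gfl ms fl tl bw _ hpre
  unfold Spec_layer_nodes_generator layer_nodes_generator layer_nodes_generator_alt generate_node_idx_for_nn
  cases ns with
  | some s => simpa [pvLabA, pvB] using core_lemma s gfl fl bw
  | none =>
      cases ms with
      | none => exact (hpre.elim (fun h => absurd rfl h) (fun h => absurd rfl h))
      | some m => simpa [pvLabA, pvB] using core_lemma m gfl fl bw
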